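-- pv_equiv track=rewrite | github.com/bradyz/sandbox | hackerrank/warmup/mansana.py | all_comb
-- ===== SOURCE A (Python) =====
-- def all_comb(num, a_val, b_val):
--     result = []
--
--     for x in range(num):
--         y = num - x - 1
--         tmp = a_val * x + b_val * y
--         result.append(tmp)
--
--     result.sort()
--     str_res = ""
--
--     for x in result:
--         str_res += str(x) + " "
--
--     return str_res
-- ===== SOURCE B (Python) =====
-- def all_comb(num, a_val, b_val):
--     # values are linear in x: a*x + b*(num-1-x) = b*(num-1) + (a-b)*x,
--     # so they are already monotone; reverse instead of sorting (no speed claim).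
--     vals = [b_val * (num - 1) + (a_val - b_val) * x for x in range(num)]
--     if a_val < b_val:
--         vals.reverse()
--     return "".join(str(v) + " " for v in vals)
-- ===== Notes on version B (the rewrite author's own statement) =====
-- stated objective: alternative
-- what changed: B exploits that a*x+b*(num-1-x) is linear (hence monotone) in x, so it emits the values already in order (reversing once when a<b) and joins them, instead of building the list, sorting it, and concatenating in a loop.
import Mathlib
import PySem

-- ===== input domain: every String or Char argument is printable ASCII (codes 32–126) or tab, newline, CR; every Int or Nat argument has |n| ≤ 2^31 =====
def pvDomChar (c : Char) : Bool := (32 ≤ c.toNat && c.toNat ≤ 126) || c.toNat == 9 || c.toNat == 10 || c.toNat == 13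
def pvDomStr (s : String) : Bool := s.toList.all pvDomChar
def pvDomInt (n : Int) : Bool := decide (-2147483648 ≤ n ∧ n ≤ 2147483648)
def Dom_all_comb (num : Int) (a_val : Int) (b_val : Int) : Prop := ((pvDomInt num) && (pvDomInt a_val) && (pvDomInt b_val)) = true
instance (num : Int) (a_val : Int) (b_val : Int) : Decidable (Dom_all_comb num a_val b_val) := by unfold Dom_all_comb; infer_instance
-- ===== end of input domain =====

-- B replaces the sort by a single reverse: the values are linear, hence monotone, in x.

-- ===== PORT A =====
def all_comb (num : Int) (a_val : Int) (b_val : Int) : String :=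
  let result : List Int :=
    (PySem.List.pyRange 0 num 1).foldl
      (fun r x => r ++ [a_val * x + b_val * (num - x - 1)]) []
  let result := PySem.List.sorted result (fun v => v) false
  result.foldl (fun s x => s ++ PySem.Int.toStr x ++ " ") ""

-- ===== PORT B =====
def all_comb_alt (num : Int) (a_val : Int) (b_val : Int) : String :=
  let vals : List Int :=
    (PySem.List.pyRange 0 num 1).map
      (fun x => b_val * (num - 1) + (a_val - b_val) * x)
  let vals := if a_val < b_val then vals.reverse else vals
  String.join (vals.map (fun v => PySem.Int.toStr v ++ " "))

-- ===== PRECONDITION & SPEC =====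
def Spec_all_comb (num : Int) (a_val : Int) (b_val : Int) (out : String) : Prop := out = all_comb_alt num a_val b_val
instance (num : Int) (a_val : Int) (b_val : Int) (out : String) : Decidable (Spec_all_comb num a_val b_val out) := by unfold Spec_all_comb; infer_instance

-- ===== CLAIM (what is proved, stated in full; the proofs are below) =====
def Claim_equal_all_comb : Prop := ∀ (num : Int) (a_val : Int) (b_val : Int), Dom_all_comb num a_val b_val → Spec_all_comb num a_val b_val (all_comb num a_val b_val)

-- ===== LEMMAS AND PROOFS =====

-- A's first loop builds exactly the mapped list
theorem pv_foldl_append_map {α β : Type} (g : α → β) (l : List α) (init : List β) :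
    l.foldl (fun r x => r ++ [g x]) init = init ++ l.map g := by
  induction l generalizing init with
  | nil => simp
  | cons a t ih => simp [List.foldl, ih]

theorem pv_strfoldl (l : List String) (init : String) :
    l.foldl (· ++ ·) init = init ++ l.foldl (· ++ ·) "" := by
  induction l generalizing init with
  | nil => simp
  | cons a t ih => rw [List.foldl, List.foldl, ih (init ++ a), ih ("" ++ a)]; simp [String.append_assoc]

theorem pv_join_cons (a : String) (l : List String) :
    String.join (a :: l) = a ++ String.join l := by
  simp only [String.join, List.foldl, pv_strfoldl l ("" ++ a)]
  simp

-- A's second loop is the join of the per-element strings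
theorem pv_foldl_str (l : List Int) (init : String) :
    l.foldl (fun s x => s ++ PySem.Int.toStr x ++ " ") init
      = init ++ String.join (l.map (fun v => PySem.Int.toStr v ++ " ")) := by
  induction l generalizing init with
  | nil => simp [String.join]
  | cons a t ih => rw [List.foldl, ih, List.map_cons, pv_join_cons]; simp [String.append_assoc]

theorem pv_sorted_vals (num a_val b_val : Int) :
    PySem.List.sorted
        ((PySem.List.pyRange 0 num 1).map (fun x => b_val * (num - 1) + (a_val - b_val) * x))
        (fun v => v) false
      = (if a_val < b_val then
          ((PySem.List.pyRange 0 num 1).map (fun x => b_val * (num - 1) + (a_val - b_val) * x)).reverse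
        else
          (PySem.List.pyRange 0 num 1).map (fun x => b_val * (num - 1) + (a_val - b_val) * x)) := by
  set f : Int → Int := fun x => b_val * (num - 1) + (a_val - b_val) * x with hf
  have hr : (PySem.List.pyRange 0 num 1).Pairwise (· < ·) := PySem.List.pairwise_lt_pyRange_one 0 num
  split_ifs with h
  · -- a < b : f strictly decreasing, the reversed list is nondecreasing
    apply PySem.List.sorted_id_eq_of_perm_of_pairwise
    · exact (List.reverse_perm _).trans (List.Perm.refl _)
    · rw [← List.map_reverse, List.pairwise_map, List.pairwise_reverse]
      refine hr.imp ?_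
      intro x y hxy
      simp only [hf]
      nlinarith
  · -- a ≥ b : f nondecreasing
    apply PySem.List.sorted_id_eq_of_perm_of_pairwise
    · exact List.Perm.refl _
    · rw [List.pairwise_map]
      refine hr.imp ?_
      intro x y hxy
      simp only [hf]
      nlinarith

theorem pv_values_eq (num a_val b_val : Int) :
    (PySem.List.pyRange 0 num 1).map (fun x => a_val * x + b_val * (num - x - 1))
      = (PySem.List.pyRange 0 num 1).map (fun x => b_val * (num - 1) + (a_val - b_val) * x) := by
  apply List.map_congr_left
  intro x _
  ring

-- ===== VERDICT (by name: the statement is the Claim_ definition above) =====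
theorem all_comb_spec : Claim_equal_all_comb := by
  intro num a_val b_val _
  unfold Spec_all_comb
  simp only [all_comb, all_comb_alt]
  rw [pv_foldl_append_map, List.nil_append, pv_values_eq, pv_sorted_vals, pv_foldl_str]
  split_ifs <;> simp
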